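-- pv_equiv track=rewrite | github.com/MetinSa/advent-of-code | 2021/10/main.py | get_completion_scores
-- ===== SOURCE A (Python) =====
-- from typing import List, Optional
--
-- COMPLETION_POINTS = {")": 1, "]": 2, "}": 3, ">": 4}
--
-- def get_completion_scores(completions: List[str]) -> List[int]:
--     scores: List[int] = []
--     for completion in completions:
--         score = 0
--         for character in completion:
--             score *= 5
--             score += COMPLETION_POINTS[character]
--         scores.append(score)
--
--     return scores
-- ===== SOURCE B (Python) =====
-- from typing import List
--
-- COMPLETION_POINTS = {")": 1, "]": 2, "}": 3, ">": 4}
--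
-- def get_completion_scores(completions: List[str]) -> List[int]:
--     return [
--         sum(COMPLETION_POINTS[c] * 5 ** (len(s) - 1 - i) for i, c in enumerate(s))
--         for s in completions
--     ]
-- ===== Notes on version B (the rewrite author's own statement) =====
-- stated objective: alternative
-- what changed: Replaces the accumulator loops (outer list-append loop, inner Horner multiply-accumulate) with nested comprehensions: each string's score is a direct sum of COMPLETION_POINTS[c] * 5**(len(s)-1-i) over enumerate(s).
import Mathlib
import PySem

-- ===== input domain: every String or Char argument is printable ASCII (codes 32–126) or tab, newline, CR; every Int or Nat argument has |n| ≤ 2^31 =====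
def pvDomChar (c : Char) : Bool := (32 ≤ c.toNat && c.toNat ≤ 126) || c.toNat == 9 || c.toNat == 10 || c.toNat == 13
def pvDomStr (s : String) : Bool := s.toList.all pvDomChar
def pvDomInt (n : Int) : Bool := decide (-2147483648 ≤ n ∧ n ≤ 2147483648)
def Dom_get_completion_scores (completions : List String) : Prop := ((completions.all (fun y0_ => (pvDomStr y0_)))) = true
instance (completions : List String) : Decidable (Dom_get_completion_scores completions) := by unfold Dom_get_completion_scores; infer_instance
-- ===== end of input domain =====

-- B replaces the accumulator loops (append loop + Horner) with nested comprehensions summing explicit positional weights 5^(len-1-i) (alternative decomposition, same cost).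


-- shared module constant COMPLETION_POINTS (dict lookup; KeyError cases are excluded by Pre_, where the .getD 0 fallback is never reached)
def completionPoints : PySem.Dict Char Int :=
  (((PySem.Dict.empty.insert ')' 1).insert ']' 2).insert '}' 3).insert '>' 4

-- ===== PORT A =====
-- inner Horner loop: for character in completion: score *= 5; score += COMPLETION_POINTS[character]
def hornerScore (score : Int) (cs : List Char) : Int :=
  match cs with
  | [] => score
  | c :: rest => hornerScore (score * 5 + (completionPoints.get? c).getD 0) rest

def get_completion_scores (completions : List String) : List Int :=
  completions.foldl (fun scores completion => scores ++ [hornerScore 0 completion.toList]) []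

-- ===== PORT B =====
-- sum(COMPLETION_POINTS[c] * 5 ** (len(s) - 1 - i) for i, c in enumerate(s));
-- the exponent len(s)-1-i is ≥ 0 for every enumerated index, so .toNat is exact
def get_completion_scores_alt (completions : List String) : List Int :=
  completions.map (fun s =>
    ((PySem.List.enumerate s.toList 0).map
      (fun p => (completionPoints.get? p.2).getD 0 * 5 ^ (((s.toList.length : Int) - 1 - p.1).toNat))).sum)

-- ===== PRECONDITION & SPEC =====
-- Pre_ excludes exactly the inputs on which Python A (and B) raise KeyError: a character not in ")]}>"
def Pre_get_completion_scores (completions : List String) : Prop :=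
  completions.all (fun s => s.toList.all (fun c => c == ')' || c == ']' || c == '}' || c == '>')) = true
instance (completions : List String) : Decidable (Pre_get_completion_scores completions) := by
  unfold Pre_get_completion_scores; infer_instance
def pvWitness_get_completion_scores : List String := ["}}]])})]", ")", ""]

def Spec_get_completion_scores (completions : List String) (out : List Int) : Prop := out = get_completion_scores_alt completions
instance (completions : List String) (out : List Int) : Decidable (Spec_get_completion_scores completions out) := by unfold Spec_get_completion_scores; infer_instance

-- ===== CLAIM (what is proved, stated in full; the proofs are below) =====
def Claim_equal_get_completion_scores : Prop := ∀ (completions : List String), Dom_get_completion_scores completions → Pre_get_completion_scores completions → Spec_get_completion_scores completions (get_completion_scores completions)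

-- ===== LEMMAS AND PROOFS =====

-- value of a char list read with weights 1,5,25,… from the head
def polyr (cs : List Char) : Int :=
  match cs with
  | [] => 0
  | c :: rest => (completionPoints.get? c).getD 0 + 5 * polyr rest

theorem polyr_append_singleton (xs : List Char) (c : Char) :
    polyr (xs ++ [c]) = polyr xs + 5 ^ xs.length * (completionPoints.get? c).getD 0 := by
  induction xs with
  | nil => simp [polyr]
  | cons x xs ih => simp [polyr, ih, pow_succ]; ring

theorem hornerScore_eq (cs : List Char) (s : Int) :
    hornerScore s cs = s * 5 ^ cs.length + polyr cs.reverse := by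
  induction cs generalizing s with
  | nil => simp [hornerScore, polyr]
  | cons c rest ih =>
      simp [hornerScore, ih, polyr_append_singleton, pow_succ]
      ring

theorem sum_enum_eq (cs : List Char) (s : Int) :
    ((PySem.List.enumerate cs s).map
      (fun p => (completionPoints.get? p.2).getD 0 * 5 ^ (((s + cs.length) - 1 - p.1).toNat))).sum
      = polyr cs.reverse := by
  induction cs generalizing s with
  | nil => simp [PySem.List.enumerate, polyr]
  | cons c rest ih =>
      rw [PySem.List.enumerate_cons]
      have hlen : s + ((c :: rest).length : Int) = (s + 1) + (rest.length : Int) := by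
        simp; ring
      simp only [List.map, List.sum_cons, hlen]
      have hhead : ((s + 1) + (rest.length : Int) - 1 - s).toNat = rest.length := by omega
      rw [hhead, ih (s + 1)]
      simp [polyr_append_singleton]
      ring

theorem score_eq (s : String) :
    hornerScore 0 s.toList
      = ((PySem.List.enumerate s.toList 0).map
          (fun p => (completionPoints.get? p.2).getD 0 * 5 ^ (((s.toList.length : Int) - 1 - p.1).toNat))).sum := by
  have h := sum_enum_eq s.toList 0
  simp only [zero_add] at h
  rw [h, hornerScore_eq]
  ring

theorem foldl_append_map {α β : Type} (f : α → β) (xs : List α) (acc : List β) :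
    xs.foldl (fun acc x => acc ++ [f x]) acc = acc ++ xs.map f := by
  induction xs generalizing acc with
  | nil => simp
  | cons x xs ih => simp [List.foldl, ih]

-- ===== VERDICT (by name: the statement is the Claim_ definition above) =====
theorem get_completion_scores_spec : Claim_equal_get_completion_scores := by
  intro completions _ _
  unfold Spec_get_completion_scores get_completion_scores get_completion_scores_alt
  rw [foldl_append_map]
  simp only [List.nil_append]
  exact List.map_congr_left (fun s _ => score_eq s)
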